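-- pv_equiv track=rewrite | github.com/dwdwow/pybnv | agg_trades_checker.py | group_missing_ids
-- ===== SOURCE A (Python) =====
-- def group_missing_ids(missing_ids: list[int]) -> list[list[int]]:
--     groups = []
--     for id in missing_ids:
--         if len(groups) == 0 or id != groups[-1][-1] + 1:
--             groups.append([id])
--         else:
--             groups[-1].append(id)
--     return groups
-- ===== SOURCE B (Python) =====
-- from itertools import groupby
--
--
-- def group_missing_ids(missing_ids: list[int]) -> list[list[int]]:
--     # Group by the invariant key value-minus-index: elements of one consecutive
--     # run share the same key, so itertools.groupby splits exactly at run breaks.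
--     return [[v for _, v in grp]
--             for _, grp in groupby(enumerate(missing_ids), key=lambda p: p[1] - p[0])]
-- ===== Notes on version B (the rewrite author's own statement) =====
-- stated objective: idiomatic
-- what changed: Replaces the mutable accumulator that compares each id to the last appended element with itertools.groupby over enumerate, keyed by value-minus-index, so each constant-key group is one run.
import Mathlib
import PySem

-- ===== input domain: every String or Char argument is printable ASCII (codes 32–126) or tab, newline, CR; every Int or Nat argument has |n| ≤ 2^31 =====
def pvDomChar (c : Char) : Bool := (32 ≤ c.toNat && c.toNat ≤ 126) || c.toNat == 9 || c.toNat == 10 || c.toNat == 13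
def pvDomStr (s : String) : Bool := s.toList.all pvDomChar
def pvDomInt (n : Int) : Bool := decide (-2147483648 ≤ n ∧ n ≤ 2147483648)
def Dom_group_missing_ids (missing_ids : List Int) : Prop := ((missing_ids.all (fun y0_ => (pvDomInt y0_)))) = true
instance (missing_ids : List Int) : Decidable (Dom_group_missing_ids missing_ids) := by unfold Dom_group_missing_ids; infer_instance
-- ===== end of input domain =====

-- B groups by the value-minus-index key (itertools.groupby style) instead of A's
-- compare-with-last-appended accumulator; same cost, more declarative (objective: idiomatic).
-- A mutates no argument; the equivalence is about the return value.

-- ===== PORT A =====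
-- one iteration of A's loop; the in-place 'groups[-1].append(id)' is modelled as
-- dropLast ++ [updated last group]
def stepA (groups : List (List Int)) (id : Int) : List (List Int) :=
  if groups.length = 0 then groups ++ [[id]]
  else if id ≠ PySem.List.pyGetD (PySem.List.pyGetD groups (-1) []) (-1) 0 + 1 then
    groups ++ [[id]]
  else
    groups.dropLast ++ [PySem.List.pyGetD groups (-1) [] ++ [id]]

def group_missing_ids (missing_ids : List Int) : List (List Int) :=
  missing_ids.foldl stepA []

-- ===== PORT B =====
-- itertools.groupby: maximal runs of adjacent elements with equal keys
def runsBy {α β : Type} [BEq β] (key : α → β) : List α → List (List α)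
  | [] => []
  | x :: xs =>
    match runsBy key xs with
    | [] => [[x]]
    | [] :: _ => [[x]]
    | (y :: g) :: gs => if key x == key y then (x :: y :: g) :: gs else [x] :: (y :: g) :: gs

def group_missing_ids_alt (missing_ids : List Int) : List (List Int) :=
  (runsBy (fun p : Int × Int => p.2 - p.1) (PySem.List.enumerate missing_ids 0)).map
    (List.map Prod.snd)

-- ===== PRECONDITION & SPEC =====
def Spec_group_missing_ids (missing_ids : List Int) (out : List (List Int)) : Prop := out = group_missing_ids_alt missing_ids
instance (missing_ids : List Int) (out : List (List Int)) : Decidable (Spec_group_missing_ids missing_ids out) := by unfold Spec_group_missing_ids; infer_instance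

-- ===== CLAIM (what is proved, stated in full; the proofs are below) =====
def Claim_equal_group_missing_ids : Prop := ∀ (missing_ids : List Int), Dom_group_missing_ids missing_ids → Spec_group_missing_ids missing_ids (group_missing_ids missing_ids)

-- ===== LEMMAS AND PROOFS =====

-- reference grouping both ports are reduced to
def pvSpec : List Int → List (List Int)
  | [] => []
  | [x] => [[x]]
  | x :: y :: ys =>
    match pvSpec (y :: ys) with
    | [] => [[x]]
    | g :: gs => if y = x + 1 then (x :: g) :: gs else [x] :: g :: gs

-- forward grouping with an explicit open group, mirroring A's accumulator
def pvGlue : List Int → List Int → List (List Int)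
  | g, [] => [g]
  | g, x :: xs =>
    if x = PySem.List.pyGetD g (-1) 0 + 1 then pvGlue (g ++ [x]) xs else g :: pvGlue [x] xs

def mergeHead (g : List Int) : List (List Int) → List (List Int)
  | [] => [g]
  | h :: t => (g ++ h) :: t

theorem pvSpec_head (ys : List Int) (y : Int) :
    ∃ t gs, pvSpec (y :: ys) = (y :: t) :: gs := by
  cases ys with
  | nil => exact ⟨[], [], rfl⟩
  | cons z zs =>
    cases h : pvSpec (z :: zs) with
    | nil => exact ⟨[], [], by simp [pvSpec, h]⟩
    | cons g gs =>
      by_cases hz : z = y + 1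
      · exact ⟨g, gs, by simp only [pvSpec]; rw [h]; simp [hz]⟩
      · exact ⟨[], g :: gs, by simp only [pvSpec]; rw [h]; simp [hz]⟩

theorem stepA_concat (pre : List (List Int)) (g : List Int) (_hg : g ≠ [])
    (x : Int) :
    stepA (pre ++ [g]) x =
      if x = PySem.List.pyGetD g (-1) 0 + 1 then pre ++ [g ++ [x]]
      else (pre ++ [g]) ++ [[x]] := by
  unfold stepA
  rw [if_neg (by simp), PySem.List.pyGetD_neg_one_append_singleton]
  by_cases hc : x = PySem.List.pyGetD g (-1) 0 + 1
  · simp [hc]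
  · simp [hc]

theorem foldl_stepA (xs : List Int) : ∀ (pre : List (List Int)) (g : List Int), g ≠ [] →
    List.foldl stepA (pre ++ [g]) xs = pre ++ pvGlue g xs := by
  induction xs with
  | nil => intro pre g _; simp [pvGlue]
  | cons x xs ih =>
    intro pre g hg
    rw [List.foldl_cons, stepA_concat pre g hg x]
    by_cases hc : x = PySem.List.pyGetD g (-1) 0 + 1
    · rw [if_pos hc, ih pre (g ++ [x]) (by simp)]
      simp [pvGlue, hc]
    · rw [if_neg hc, ih (pre ++ [g]) [x] (by simp)]
      simp [pvGlue, hc]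

theorem pvGlue_spec : ∀ (xs : List Int) (x : Int) (g : List Int), g ≠ [] →
    pvGlue g (x :: xs) =
      if x = PySem.List.pyGetD g (-1) 0 + 1 then mergeHead g (pvSpec (x :: xs))
      else g :: pvSpec (x :: xs) := by
  intro xs
  induction xs with
  | nil =>
    intro x g hg
    by_cases hc : x = PySem.List.pyGetD g (-1) 0 + 1 <;>
      simp [pvGlue, pvSpec, mergeHead, hc]
  | cons y ys ih =>
    intro x g hg
    obtain ⟨t, gs, hsp⟩ := pvSpec_head ys y
    have hx1 : PySem.List.pyGetD (g ++ [x]) (-1) 0 = x :=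
      PySem.List.pyGetD_neg_one_append_singleton g x 0
    have hx2 : PySem.List.pyGetD [x] (-1) 0 = x := by
      simpa using PySem.List.pyGetD_neg_one_append_singleton [] x 0
    by_cases hc : x = PySem.List.pyGetD g (-1) 0 + 1
    · rw [if_pos hc]
      have hl : pvGlue g (x :: y :: ys) = pvGlue (g ++ [x]) (y :: ys) := by
        simp [pvGlue, hc]
      rw [hl, ih y (g ++ [x]) (by simp), hx1]
      simp only [pvSpec]
      rw [hsp]
      by_cases hy : y = x + 1 <;> simp [hy, mergeHead, List.append_assoc]
    · rw [if_neg hc]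
      have hl : pvGlue g (x :: y :: ys) = g :: pvGlue [x] (y :: ys) := by
        simp [pvGlue, hc]
      rw [hl, ih y [x] (by simp), hx2]
      simp only [pvSpec]
      rw [hsp]
      by_cases hy : y = x + 1 <;> simp [hy, mergeHead]

theorem A_eq_spec (xs : List Int) : group_missing_ids xs = pvSpec xs := by
  cases xs with
  | nil => rfl
  | cons x xs =>
    have h0 : group_missing_ids (x :: xs) = pvGlue [x] xs := by
      unfold group_missing_ids
      rw [List.foldl_cons]
      have hs : stepA [] x = [] ++ [[x]] := rfl
      rw [hs, foldl_stepA xs [] [x] (by simp)]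
      simp
    rw [h0]
    cases xs with
    | nil => rfl
    | cons y ys =>
      have hx2 : PySem.List.pyGetD [x] (-1) 0 = x := by
        simpa using PySem.List.pyGetD_neg_one_append_singleton [] x 0
      rw [pvGlue_spec ys y [x] (by simp), hx2]
      obtain ⟨t, gs, hsp⟩ := pvSpec_head ys y
      simp only [pvSpec]
      rw [hsp]
      by_cases hy : y = x + 1 <;> simp [hy, mergeHead]

theorem runsBy_head {α β : Type} [BEq β] (key : α → β) (a : α) (l : List α) :
    ∃ t gs, runsBy key (a :: l) = (a :: t) :: gs := by
  cases h : runsBy key l with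
  | nil => exact ⟨[], [], by simp [runsBy, h]⟩
  | cons g gs =>
    cases g with
    | nil => exact ⟨[], [], by simp [runsBy, h]⟩
    | cons b g' =>
      by_cases hk : key a == key b
      · exact ⟨b :: g', gs, by simp [runsBy, h, hk]⟩
      · exact ⟨[], (b :: g') :: gs, by simp [runsBy, h, hk]⟩

theorem runsBy_cons₂ {α β : Type} [BEq β] (key : α → β) (a b : α) (l : List α)
    (t : List α) (gs : List (List α)) (h : runsBy key (b :: l) = (b :: t) :: gs) :
    runsBy key (a :: b :: l) =
      if key a == key b then (a :: b :: t) :: gs else [a] :: (b :: t) :: gs := by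
  rw [runsBy, h]

theorem B_eq_spec_aux : ∀ (xs : List Int) (x : Int) (i : Int),
    (runsBy (fun p : Int × Int => p.2 - p.1) (PySem.List.enumerate (x :: xs) i)).map
      (List.map Prod.snd) = pvSpec (x :: xs) := by
  intro xs
  induction xs with
  | nil =>
    intro x i
    simp [PySem.List.enumerate_cons, PySem.List.enumerate_nil, runsBy, pvSpec]
  | cons y ys ih =>
    intro x i
    obtain ⟨t, gs, hr⟩ :=
      runsBy_head (fun p : Int × Int => p.2 - p.1) ((i + 1, y))
        (PySem.List.enumerate ys (i + 1 + 1))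
    have hih := ih y (i + 1)
    rw [PySem.List.enumerate_cons, hr] at hih
    simp only [List.map_cons] at hih
    rw [PySem.List.enumerate_cons, PySem.List.enumerate_cons,
      runsBy_cons₂ _ _ _ _ t gs hr]
    by_cases hy : y = x + 1
    · rw [if_pos (by simp [beq_iff_eq]; omega)]
      simp only [pvSpec, List.map_cons]
      rw [← hih]
      simp [hy]
    · rw [if_neg (by simp [beq_iff_eq]; omega)]
      simp only [pvSpec, List.map_cons]
      rw [← hih]
      simp [hy]

theorem B_eq_spec (xs : List Int) : group_missing_ids_alt xs = pvSpec xs := by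
  cases xs with
  | nil => rfl
  | cons x xs =>
    unfold group_missing_ids_alt
    exact B_eq_spec_aux xs x 0

-- ===== VERDICT (by name: the statement is the Claim_ definition above) =====
theorem group_missing_ids_spec : Claim_equal_group_missing_ids := by
  intro xs _
  unfold Spec_group_missing_ids
  rw [A_eq_spec, B_eq_spec]
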